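-- pv_equiv track=rewrite | github.com/JakubSosnowski12/J-zykiIParadygmatyProgramowania | Zadania/Lab1/Zad3.py | optymalizacjaproceduralna
-- ===== SOURCE A (Python) =====
-- def optymalizacjaproceduralna(zadania):
--     zadania.sort(key=lambda x: x[0])
--     calkowity_czas = 0
--     czas_oczekiwania = 0
--
--     for czas, nagroda in zadania:
--         calkowity_czas += czas
--         czas_oczekiwania += calkowity_czas
--
--     return zadania, czas_oczekiwania
-- ===== SOURCE B (Python) =====
-- def optymalizacjaproceduralna(zadania):
--     zadania.sort(key=lambda x: x[0])
--     czas_oczekiwania = 0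
--     mnoznik = 1
--     i = len(zadania) - 1
--     while i >= 0:
--         czas_oczekiwania += zadania[i][0] * mnoznik
--         mnoznik += 1
--         i -= 1
--     return zadania, czas_oczekiwania
-- ===== Notes on version B (the rewrite author's own statement) =====
-- stated objective: alternative
-- what changed: Replaces A's forward pass with a running prefix-sum accumulator (sum of prefix sums) by a backward index while-loop that multiplies each task's time by its remaining-task count directly, using the identity sum of prefix sums = sum t_i*(n-i).
import Mathlib
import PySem

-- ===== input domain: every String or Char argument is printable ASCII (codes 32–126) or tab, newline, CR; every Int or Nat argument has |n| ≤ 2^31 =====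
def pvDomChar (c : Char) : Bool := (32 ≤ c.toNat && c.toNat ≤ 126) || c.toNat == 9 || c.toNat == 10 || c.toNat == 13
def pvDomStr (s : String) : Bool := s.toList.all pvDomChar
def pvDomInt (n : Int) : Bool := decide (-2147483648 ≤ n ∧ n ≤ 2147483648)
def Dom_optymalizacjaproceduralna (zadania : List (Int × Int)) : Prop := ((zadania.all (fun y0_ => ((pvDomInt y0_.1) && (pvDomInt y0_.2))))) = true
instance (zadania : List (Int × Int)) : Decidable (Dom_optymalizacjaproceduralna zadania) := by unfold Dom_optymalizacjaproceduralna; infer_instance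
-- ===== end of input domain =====

-- B replaces A's forward prefix-sum accumulation by a backward index while-loop weighting each
-- time by its remaining-task count; equivalence is about the RETURN value only (the Python A and
-- B both sort the argument in place — the same mutation).

-- ===== PORT A =====
def optymalizacjaproceduralna (zadania : List (Int × Int)) : (List (Int × Int)) × Int :=
  let s := PySem.List.sorted zadania (fun x => x.1) false
  let r := s.foldl (fun (acc : Int × Int) p => (acc.1 + p.1, acc.2 + (acc.1 + p.1))) (0, 0)
  (s, r.2)

-- ===== PORT B =====
-- B's backward while-loop: index i = j-1 counts down; zadania[i] is always in range for the
-- indices the loop visits, so List.getD is exact here.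
def pvLoopB (s : List (Int × Int)) : Nat → Int → Int → Int
  | 0, _, w => w
  | j + 1, k, w => pvLoopB s j (k + 1) (w + (s.getD j (0, 0)).1 * k)

def optymalizacjaproceduralna_alt (zadania : List (Int × Int)) : (List (Int × Int)) × Int :=
  let s := PySem.List.sorted zadania (fun x => x.1) false
  (s, pvLoopB s s.length 1 0)

-- ===== PRECONDITION & SPEC =====
def Spec_optymalizacjaproceduralna (zadania : List (Int × Int)) (out : (List (Int × Int)) × Int) : Prop := out = optymalizacjaproceduralna_alt zadania
instance (zadania : List (Int × Int)) (out : (List (Int × Int)) × Int) : Decidable (Spec_optymalizacjaproceduralna zadania out) := by unfold Spec_optymalizacjaproceduralna; infer_instance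

-- ===== CLAIM (what is proved, stated in full; the proofs are below) =====
def Claim_equal_optymalizacjaproceduralna : Prop := ∀ (zadania : List (Int × Int)), Dom_optymalizacjaproceduralna zadania → Spec_optymalizacjaproceduralna zadania (optymalizacjaproceduralna zadania)

-- ===== LEMMAS AND PROOFS =====

/-- Σ tᵢ · (len − i), written structurally: the common specification value. -/
def pvWsum : List (Int × Int) → Int
  | [] => 0
  | p :: r => p.1 * ((p :: r).length : Int) + pvWsum r

/-- Sum of the times. -/
def pvSumT : List (Int × Int) → Int
  | [] => 0
  | p :: r => p.1 + pvSumT r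

theorem pvFoldA_eq (l : List (Int × Int)) : ∀ (c w : Int),
    (l.foldl (fun (acc : Int × Int) p => (acc.1 + p.1, acc.2 + (acc.1 + p.1))) (c, w)).2
      = w + (l.length : Int) * c + pvWsum l := by
  induction l with
  | nil => intro c w; simp [pvWsum]
  | cons p r ih =>
      intro c w
      simp only [List.foldl_cons, pvWsum, List.length_cons, ih]
      push_cast
      ring

theorem pvWsum_append (l : List (Int × Int)) (p : Int × Int) :
    pvWsum (l ++ [p]) = pvWsum l + pvSumT l + p.1 := by
  induction l with
  | nil => simp [pvWsum, pvSumT]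
  | cons q r ih =>
      simp only [List.cons_append, pvWsum, pvSumT, ih, List.length_append, List.length_cons, List.length_nil]
      push_cast
      ring

theorem pvLoopB_eq (s : List (Int × Int)) : ∀ (j : Nat), j ≤ s.length → ∀ (k w : Int),
    pvLoopB s j k w = w + (k - 1) * pvSumT (s.take j) + pvWsum (s.take j) := by
  intro j
  induction j with
  | zero => intro _ k w; simp [pvLoopB, pvWsum, pvSumT]
  | succ j ih =>
      intro hj k w
      have hjl : j < s.length := Nat.lt_of_succ_le hj
      have htake : s.take (j + 1) = s.take j ++ [s[j]] := by
        rw [List.take_add_one]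
        simp [List.getElem?_eq_getElem hjl]
      have hget : s.getD j (0, 0) = s[j] := List.getD_eq_getElem s (0, 0) hjl
      rw [pvLoopB, hget, ih (Nat.le_of_lt hjl), htake, pvWsum_append]
      have hsum : pvSumT (s.take j ++ [s[j]]) = pvSumT (s.take j) + (s[j]).1 := by
        induction (s.take j) with
        | nil => simp [pvSumT]
        | cons q r ih2 => simp only [List.cons_append, pvSumT, ih2]; ring
      rw [hsum]
      ring

-- ===== VERDICT (by name: the statement is the Claim_ definition above) =====
theorem optymalizacjaproceduralna_spec : Claim_equal_optymalizacjaproceduralna := by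
  intro zadania _
  unfold Spec_optymalizacjaproceduralna optymalizacjaproceduralna optymalizacjaproceduralna_alt
  set s := PySem.List.sorted zadania (fun x => x.1) false with hs
  simp only
  refine Prod.ext rfl ?_
  rw [pvFoldA_eq s 0 0, pvLoopB_eq s s.length (Nat.le_refl _) 1 0, List.take_length]
  ring
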